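-- pv_equiv track=rewrite | github.com/Naveendinula/DigitalTwin | backend/ifc_validation.py | _infer_domain_from_spec_name
-- ===== SOURCE A (Python) =====
-- from enum import Enum
--
-- class Domain(str, Enum):
--     """Validation domains corresponding to application features."""
--     CORE = "core"           # Basic viewer requirements
--     HVAC_FM = "hvac_fm"     # HVAC/Facilities Management
--     EC = "ec"               # Embodied Carbon
--     OCCUPANCY = "occupancy" # Occupancy simulation
--
-- def _infer_domain_from_spec_name(spec_name: str) -> str:
--     """Infer domain from specification name."""
--     name_lower = spec_name.lower()
--
--     if any(kw in name_lower for kw in ["project", "storey", "building", "site", "element"]):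
--         return Domain.CORE.value
--     elif any(kw in name_lower for kw in ["hvac", "terminal", "space", "zone", "system", "duct"]):
--         return Domain.HVAC_FM.value
--     elif any(kw in name_lower for kw in ["material", "carbon", "wall", "slab", "column", "beam"]):
--         return Domain.EC.value
--     elif any(kw in name_lower for kw in ["occupancy", "area", "person", "room"]):
--         return Domain.OCCUPANCY.value
--     return Domain.CORE.value
-- ===== SOURCE B (Python) =====
-- # One flat keyword -> priority-index map; result = domain with the smallest
-- # matched priority index (min over all matches), default 0 ("core").
-- _KW_PRIORITY = {
--     "project": 0, "storey": 0, "building": 0, "site": 0, "element": 0,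
--     "hvac": 1, "terminal": 1, "space": 1, "zone": 1, "system": 1, "duct": 1,
--     "material": 2, "carbon": 2, "wall": 2, "slab": 2, "column": 2, "beam": 2,
--     "occupancy": 3, "area": 3, "person": 3, "room": 3,
-- }
-- _DOMAINS = ("core", "hvac_fm", "ec", "occupancy")
--
-- def _infer_domain_from_spec_name(spec_name: str) -> str:
--     """Infer domain from specification name."""
--     name_lower = spec_name.lower()
--     best = min((p for kw, p in _KW_PRIORITY.items() if kw in name_lower), default=0)
--     return _DOMAINS[best]
-- ===== Notes on version B (the rewrite author's own statement) =====
-- stated objective: alternative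
-- what changed: Instead of A's priority if/elif chain of per-domain any() tests, B uses one flat keyword-to-priority-index dict, takes the minimum priority among all matched keywords (default 0) in a single pass, and indexes a domain tuple with it; correct because the minimum matched index equals the first matching branch of A's chain.
import Mathlib
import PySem

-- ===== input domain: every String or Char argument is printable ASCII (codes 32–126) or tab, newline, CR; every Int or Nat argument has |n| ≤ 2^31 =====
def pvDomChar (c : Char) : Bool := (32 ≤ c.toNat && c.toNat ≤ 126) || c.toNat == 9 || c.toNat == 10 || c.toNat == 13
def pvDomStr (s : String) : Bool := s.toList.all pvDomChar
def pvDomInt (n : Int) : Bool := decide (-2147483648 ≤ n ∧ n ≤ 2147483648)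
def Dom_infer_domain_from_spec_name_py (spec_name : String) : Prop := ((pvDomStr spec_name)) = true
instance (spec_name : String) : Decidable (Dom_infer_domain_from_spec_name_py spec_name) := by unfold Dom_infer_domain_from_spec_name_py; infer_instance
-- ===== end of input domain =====

-- B replaces A's priority if/elif chain by one flat keyword→priority map: it takes the MIN matched priority index (default 0) and indexes a domain tuple; objective: alternative.


-- ===== PORT A =====
def infer_domain_from_spec_name_py (spec_name : String) : String :=
  let name_lower := PySem.Str.lower spec_name
  if (["project", "storey", "building", "site", "element"]).any (fun kw => PySem.Str.isIn kw name_lower) then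
    "core"
  else if (["hvac", "terminal", "space", "zone", "system", "duct"]).any (fun kw => PySem.Str.isIn kw name_lower) then
    "hvac_fm"
  else if (["material", "carbon", "wall", "slab", "column", "beam"]).any (fun kw => PySem.Str.isIn kw name_lower) then
    "ec"
  else if (["occupancy", "area", "person", "room"]).any (fun kw => PySem.Str.isIn kw name_lower) then
    "occupancy"
  else
    "core"

-- ===== PORT B =====
-- the module-level dict _KW_PRIORITY (keyword → priority index), in its literal insertion order
def kwPriority : List (String × Nat) :=
  [("project", 0), ("storey", 0), ("building", 0), ("site", 0), ("element", 0),
   ("hvac", 1), ("terminal", 1), ("space", 1), ("zone", 1), ("system", 1), ("duct", 1),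
   ("material", 2), ("carbon", 2), ("wall", 2), ("slab", 2), ("column", 2), ("beam", 2),
   ("occupancy", 3), ("area", 3), ("person", 3), ("room", 3)]

-- the module-level tuple _DOMAINS
def domainsTable : List String := ["core", "hvac_fm", "ec", "occupancy"]

def infer_domain_from_spec_name_py_alt (spec_name : String) : String :=
  let name_lower := PySem.Str.lower spec_name
  -- min((p for kw, p in _KW_PRIORITY.items() if kw in name_lower), default=0)
  let best : Nat :=
    (((kwPriority.filter (fun p => PySem.Str.isIn p.1 name_lower)).map (·.2)).min?).getD 0
  -- _DOMAINS[best]: best is always 0–3, in range, so the getD default is never used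
  domainsTable.getD best ""

-- ===== PRECONDITION & SPEC =====
def Spec_infer_domain_from_spec_name_py (spec_name : String) (out : String) : Prop := out = infer_domain_from_spec_name_py_alt spec_name
instance (spec_name : String) (out : String) : Decidable (Spec_infer_domain_from_spec_name_py spec_name out) := by unfold Spec_infer_domain_from_spec_name_py; infer_instance

-- ===== CLAIM (what is proved, stated in full; the proofs are below) =====
def Claim_equal_infer_domain_from_spec_name_py : Prop := ∀ (spec_name : String), Dom_infer_domain_from_spec_name_py spec_name → Spec_infer_domain_from_spec_name_py spec_name (infer_domain_from_spec_name_py spec_name)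

-- ===== LEMMAS AND PROOFS =====

-- min? of a constant-i block followed by elements all ≥ i is i when the block is nonempty
theorem min?_const_append (i : Nat) (l1 l2 : List Nat)
    (h1 : ∀ x ∈ l1, x = i) (h2 : ∀ x ∈ l2, i ≤ x) (hne : l1 ≠ []) :
    (l1 ++ l2).min? = some i := by
  rw [List.min?_eq_some_iff]
  constructor
  · cases l1 with
    | nil => exact absurd rfl hne
    | cons a t => simp [h1 a (by simp)]
  · intro b hb
    rcases List.mem_append.mp hb with h | h
    · exact le_of_eq (h1 b h).symm
    · exact h2 b h

-- the flat keyword table split into its four constant-priority groups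
theorem kwPriority_split :
    kwPriority =
      (["project", "storey", "building", "site", "element"]).map (fun k => (k, 0)) ++
      (["hvac", "terminal", "space", "zone", "system", "duct"]).map (fun k => (k, 1)) ++
      (["material", "carbon", "wall", "slab", "column", "beam"]).map (fun k => (k, 2)) ++
      (["occupancy", "area", "person", "room"]).map (fun k => (k, 3)) := by
  rfl

-- filtering on the keyword and projecting the priority over one constant group
theorem filter_map_group (c : String → Bool) (kws : List String) (i : Nat) :
    ((kws.map (fun k => (k, i))).filter (fun p => c p.1)).map (·.2)
      = (kws.filter c).map (fun _ => i) := by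
  induction kws with
  | nil => rfl
  | cons k t ih =>
    by_cases h : c k = true <;> simp [h, ih]


-- min? of a nonempty constant-i list is i
theorem min?_const (i : Nat) (l : List Nat) (h1 : ∀ x ∈ l, x = i) (hne : l ≠ []) :
    l.min? = some i := by
  have := min?_const_append i l [] h1 (by simp) hne
  simpa using this

-- a group with a true `any` has a nonempty filter
theorem filter_ne_nil_of_any (c : String → Bool) (kws : List String)
    (h : kws.any c = true) : kws.filter c ≠ [] := by
  intro hnil
  rcases List.any_eq_true.mp h with ⟨k, hk, hck⟩
  exact absurd (List.mem_filter.mpr ⟨hk, hck⟩) (by simp [hnil])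

-- a group with a false `any` filters to nil
theorem filter_nil_of_any_false (c : String → Bool) (kws : List String)
    (h : kws.any c = false) : kws.filter c = [] := by
  rw [List.filter_eq_nil_iff]
  intro k hk
  exact (List.any_eq_false.mp h) k hk

-- ===== VERDICT (by name: the statement is the Claim_ definition above) =====
theorem infer_domain_from_spec_name_py_spec : Claim_equal_infer_domain_from_spec_name_py := by
  intro s _
  unfold Spec_infer_domain_from_spec_name_py infer_domain_from_spec_name_py infer_domain_from_spec_name_py_alt
  have hsplit : ∀ nl : String, (kwPriority.filter (fun p => PySem.Str.isIn p.1 nl)).map (·.2)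
      = ((["project", "storey", "building", "site", "element"]).filter (fun kw => PySem.Str.isIn kw nl)).map (fun _ => 0) ++
        (((["hvac", "terminal", "space", "zone", "system", "duct"]).filter (fun kw => PySem.Str.isIn kw nl)).map (fun _ => 1) ++
        ((((["material", "carbon", "wall", "slab", "column", "beam"]).filter (fun kw => PySem.Str.isIn kw nl)).map (fun _ => 2)) ++
        ((["occupancy", "area", "person", "room"]).filter (fun kw => PySem.Str.isIn kw nl)).map (fun _ => 3))) := by
    intro nl
    rw [kwPriority_split]
    simp only [List.filter_append, List.map_append, List.append_assoc,
      filter_map_group (fun kw => PySem.Str.isIn kw nl)]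
  simp only [hsplit]
  set nl := PySem.Str.lower s with hnl
  by_cases h0 : (["project", "storey", "building", "site", "element"]).any (fun kw => PySem.Str.isIn kw nl) = true
  · rw [if_pos h0,
      min?_const_append 0 _ _ (by simp) (by simp) (by simpa using filter_ne_nil_of_any _ _ h0)]
    rfl
  · rw [if_neg h0, filter_nil_of_any_false _ _ (Bool.eq_false_iff.mpr h0), List.map_nil, List.nil_append]
    by_cases h1 : (["hvac", "terminal", "space", "zone", "system", "duct"]).any (fun kw => PySem.Str.isIn kw nl) = true
    · rw [if_pos h1,
        min?_const_append 1 _ _ (by simp) (by simp; omega) (by simpa using filter_ne_nil_of_any _ _ h1)]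
      rfl
    · rw [if_neg h1, filter_nil_of_any_false _ _ (Bool.eq_false_iff.mpr h1), List.map_nil, List.nil_append]
      by_cases h2 : (["material", "carbon", "wall", "slab", "column", "beam"]).any (fun kw => PySem.Str.isIn kw nl) = true
      · rw [if_pos h2,
          min?_const_append 2 _ _ (by simp) (by simp) (by simpa using filter_ne_nil_of_any _ _ h2)]
        rfl
      · rw [if_neg h2, filter_nil_of_any_false _ _ (Bool.eq_false_iff.mpr h2), List.map_nil, List.nil_append]
        by_cases h3 : (["occupancy", "area", "person", "room"]).any (fun kw => PySem.Str.isIn kw nl) = true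
        · rw [if_pos h3,
            min?_const 3 _ (by simp) (by simpa using filter_ne_nil_of_any _ _ h3)]
          rfl
        · rw [if_neg h3, filter_nil_of_any_false _ _ (Bool.eq_false_iff.mpr h3), List.map_nil]
          rfl
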